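-- pv_equiv track=rewrite | github.com/koaeH/JMdict-sdcv | k/util/maya.py | ekki
-- ===== SOURCE A (Python) =====
-- MASU = MU = U = 0x1FFFFF
--
-- def ekki(mako):
--     e = []
--
--     prae = is_zero = 0
--     for i, akko in enumerate(reversed(mako)):
--         if akko >> 28 == 0:
--             break
--
--         if 1 == i:
--             if prae & U == 0x30:
--                 if akko & U in [ 0x5B, 0x3B ]:
--                     is_zero = 1
--
--         e.append(akko)
--
--         prae = akko
--
--     e.reverse()
--
--     return e, is_zero
-- ===== SOURCE B (Python) =====
-- U = 0x1FFFFF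
--
-- def ekki(mako):
--     # Forward scan with a reset accumulator: no reversed(), no break, no index.
--     # e is always the trailing run (in original order) of elements seen so far
--     # whose high bits (>> 28) are nonzero; a "zero" element resets it.
--     e = []
--     for akko in mako:
--         if akko >> 28 == 0:
--             e = []
--         else:
--             e.append(akko)
--     is_zero = 1 if (len(e) >= 2 and e[-1] & U == 0x30 and e[-2] & U in (0x5B, 0x3B)) else 0
--     return e, is_zero
-- ===== Notes on version B (the rewrite author's own statement) =====
-- stated objective: alternative
-- what changed: B scans FORWARD over mako with a reset accumulator (clear e whenever akko>>28==0, append otherwise) so the trailing run is ready in order with no reversed(), no break, no index counter and no final reverse, and the flag is computed afterwards from the last two collected elements; A scans the reversed list with an early break and sets the flag mid-loop at index 1.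
import Mathlib
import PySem

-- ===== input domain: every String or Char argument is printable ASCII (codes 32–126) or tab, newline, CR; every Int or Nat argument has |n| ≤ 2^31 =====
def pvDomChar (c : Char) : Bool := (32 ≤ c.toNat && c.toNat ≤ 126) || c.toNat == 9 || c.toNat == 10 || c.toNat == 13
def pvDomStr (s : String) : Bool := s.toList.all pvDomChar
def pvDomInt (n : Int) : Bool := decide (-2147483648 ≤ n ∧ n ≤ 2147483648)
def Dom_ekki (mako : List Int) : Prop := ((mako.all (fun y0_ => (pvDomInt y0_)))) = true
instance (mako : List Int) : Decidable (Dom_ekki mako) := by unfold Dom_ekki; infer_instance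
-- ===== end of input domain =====

-- B replaces A's backward break-scan by a forward reset-accumulator scan plus a separate flag step; same O(n) cost, different traversal.

-- ===== PORT A =====
-- literal port of A's for-loop over enumerate(reversed(mako)) with break;
-- state: e (appended at the back, reversed at the end), i, prae, is_zero
def ekkiLoop : List Int → Int → List Int → Int → Int → List Int × Int
  | [], _, e, _, z => (e, z)
  | akko :: rest, i, e, prae, z =>
    if akko >>> (28:Nat) = 0 then (e, z)
    else
      let z' := if i = 1 ∧ PySem.Int.band prae 0x1FFFFF = 0x30 ∧
                   (PySem.Int.band akko 0x1FFFFF = 0x5B ∨ PySem.Int.band akko 0x1FFFFF = 0x3B)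
                then 1 else z
      ekkiLoop rest (i + 1) (e ++ [akko]) akko z'

def ekki (mako : List Int) : List Int × Int :=
  let r := ekkiLoop mako.reverse 0 [] 0 0
  (r.1.reverse, r.2)

-- ===== PORT B =====
-- literal port of Source B: one forward pass, clearing e when akko >> 28 == 0 and
-- appending otherwise; then the flag from len(e) >= 2 and e[-1], e[-2]
def ekkiAltStep (e : List Int) (akko : Int) : List Int :=
  if akko >>> (28:Nat) = 0 then [] else e ++ [akko]

def ekki_alt (mako : List Int) : List Int × Int :=
  let e := mako.foldl ekkiAltStep []
  let isZero : Int :=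
    if 2 ≤ e.length ∧ PySem.Int.band (PySem.List.pyGetD e (-1) 0) 0x1FFFFF = 0x30 ∧
        (PySem.Int.band (PySem.List.pyGetD e (-2) 0) 0x1FFFFF = 0x5B ∨
         PySem.Int.band (PySem.List.pyGetD e (-2) 0) 0x1FFFFF = 0x3B)
    then 1 else 0
  (e, isZero)

-- ===== PRECONDITION & SPEC =====
def Spec_ekki (mako : List Int) (out : List Int × Int) : Prop := out = ekki_alt mako
instance (mako : List Int) (out : List Int × Int) : Decidable (Spec_ekki mako out) := by unfold Spec_ekki; infer_instance

-- ===== CLAIM (what is proved, stated in full; the proofs are below) =====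
def Claim_equal_ekki : Prop := ∀ (mako : List Int), Dom_ekki mako → Spec_ekki mako (ekki mako)

-- ===== LEMMAS AND PROOFS =====

-- canonical form both ports are reduced to, phrased on rev := mako.reverse
def ekkiCanon (rev : List Int) : List Int × Int :=
  let e := (rev.takeWhile (fun a : Int => !(a >>> (28:Nat) == 0))).reverse
  let isZero : Int :=
    if 2 ≤ e.length ∧ PySem.Int.band (PySem.List.pyGetD e (-1) 0) 0x1FFFFF = 0x30 ∧
        (PySem.Int.band (PySem.List.pyGetD e (-2) 0) 0x1FFFFF = 0x5B ∨
         PySem.Int.band (PySem.List.pyGetD e (-2) 0) 0x1FFFFF = 0x3B)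
    then 1 else 0
  (e, isZero)

theorem pyGetD_rev1 (t : List Int) (a d : Int) : PySem.List.pyGetD ((a :: t).reverse) (-1) d = a := by
  rw [List.reverse_cons]; exact PySem.List.pyGetD_neg_one_append_singleton t.reverse a d

theorem pyGetD_rev2 (t : List Int) (a b d : Int) : PySem.List.pyGetD ((a :: b :: t).reverse) (-2) d = b := by
  rw [PySem.List.pyGetD_neg_ofNat _ 2 d (by omega) (by simp)]
  simp

-- once i ≥ 2 the flag branch can never fire again: A's loop just collects the takeWhile prefix
theorem ekkiLoop_tail (l : List Int) : ∀ (i : Int) (e : List Int) (prae z : Int), 2 ≤ i →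
    ekkiLoop l i e prae z = (e ++ l.takeWhile (fun a : Int => !(a >>> (28:Nat) == 0)), z) := by
  induction l with
  | nil => intro i e prae z _; simp [ekkiLoop]
  | cons a rest ih =>
      intro i e prae z hi
      by_cases h : a >>> (28:Nat) = 0
      · simp [ekkiLoop, h]
      · rw [ekkiLoop]
        simp only [if_neg h]
        rw [if_neg (by omega), ih (i+1) (e ++ [a]) a z (by omega)]
        simp [h]

-- A equals the canonical form
theorem ekki_eq_canon (mako : List Int) : ekki mako = ekkiCanon mako.reverse := by
  unfold ekki ekkiCanon
  match h : mako.reverse with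
  | [] => simp [ekkiLoop]
  | [a] =>
      by_cases ha : a >>> (28:Nat) = 0
      · simp [ekkiLoop, ha]
      · have ha' : (a >>> (28:Nat) == 0) = false := by simpa using ha
        simp [ekkiLoop, ha, ha']
  | a :: b :: rest =>
      by_cases ha : a >>> (28:Nat) = 0
      · simp [ekkiLoop, ha]
      · have ha' : (a >>> (28:Nat) == 0) = false := by simpa using ha
        by_cases hb : b >>> (28:Nat) = 0
        · have hb' : (b >>> (28:Nat) == 0) = true := by simpa using hb
          rw [ekkiLoop]
          simp only [if_neg ha]
          rw [if_neg (by simp)]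
          rw [ekkiLoop]
          simp only [if_pos hb]
          simp [ha', hb']
        · have hb' : (b >>> (28:Nat) == 0) = false := by simpa using hb
          rw [ekkiLoop]
          simp only [if_neg ha]
          rw [if_neg (by simp)]
          rw [ekkiLoop]
          simp only [if_neg hb]
          rw [show (0:Int)+1+1 = 2 from by norm_num,
              ekkiLoop_tail rest 2 ([] ++ [a] ++ [b]) b _ (by omega)]
          simp only [List.takeWhile_cons, ha', hb', Bool.not_false, if_true]
          rw [pyGetD_rev1, pyGetD_rev2]
          simp

-- B's reset-fold computes the reversed takeWhile of the reversed list
theorem foldl_reset (l : List Int) : ∀ (e : List Int),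
    l.foldl ekkiAltStep e =
      (if l.all (fun a : Int => !(a >>> (28:Nat) == 0)) then e ++ l
       else (l.reverse.takeWhile (fun a : Int => !(a >>> (28:Nat) == 0))).reverse) := by
  induction l using List.reverseRecOn with
  | nil => intro e; simp
  | append_singleton l a ih =>
      intro e
      rw [List.foldl_append]
      by_cases ha : a >>> (28:Nat) = 0
      · have ha' : (a >>> (28:Nat) == 0) = true := by simpa using ha
        simp [List.foldl, ekkiAltStep, ha, ha']
      · have ha' : (a >>> (28:Nat) == 0) = false := by simpa using ha
        rw [ih e]
        by_cases hall : l.all (fun a : Int => !(a >>> (28:Nat) == 0))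
        · simp [List.foldl, ekkiAltStep, ha, hall]
        · simp [List.foldl, ekkiAltStep, ha, hall]

-- B equals the canonical form
theorem ekki_alt_eq_canon (mako : List Int) : ekki_alt mako = ekkiCanon mako.reverse := by
  unfold ekki_alt ekkiCanon
  rw [foldl_reset mako []]
  by_cases hall : mako.all (fun a : Int => !(a >>> (28:Nat) == 0))
  · rw [if_pos hall]
    have : mako.reverse.takeWhile (fun a : Int => !(a >>> (28:Nat) == 0)) = mako.reverse := by
      refine List.takeWhile_eq_self_iff.mpr ?_
      intro x hx
      simpa using List.all_eq_true.mp hall x (List.mem_reverse.mp hx)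
    simp [this]
  · rw [if_neg hall]

-- ===== VERDICT (by name: the statement is the Claim_ definition above) =====
theorem ekki_spec : Claim_equal_ekki := by
  intro mako _
  unfold Spec_ekki
  rw [ekki_eq_canon, ekki_alt_eq_canon]
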